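-- pv_equiv track=rewrite | github.com/lanealfstad/CSCI5523_old | CSCI5523HW2/task1.py | get_subsets2
-- ===== SOURCE A (Python) =====
-- def get_subsets2(subsets, baskets, valid_buckets, thres):
--     new_baskets = []
--     valid = []
--     for bas in baskets:
--         new_baskets.append(set(bas))
--     for subset in subsets:
--         if (hash(sorted(subset)[0]) % 20) in valid_buckets:
--             count = 0
--             for bas in new_baskets:
--                 if set(subset).issubset(bas):
--                     count += 1
--             if count >= thres:
--                 valid.append(subset)
--     return valid
-- ===== SOURCE B (Python) =====
-- def get_subsets2(subsets, baskets, valid_buckets, thres):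
--     # vertical (inverted) index: item -> set of basket ids; per subset intersect tid-sets
--     index = {}
--     for i, bas in enumerate(baskets):
--         for item in bas:
--             index.setdefault(item, set()).add(i)
--     vb = set(valid_buckets)
--     valid = []
--     for subset in subsets:
--         if hash(min(subset)) % 20 in vb:
--             tids = None
--             for item in subset:
--                 t = index.get(item, set())
--                 tids = t if tids is None else tids & t
--             if len(tids) >= thres:
--                 valid.append(subset)
--     return valid
-- ===== Notes on version B (the rewrite author's own statement) =====
-- stated objective: alternative
-- what changed: Replaces A's per-subset issubset scan over every basket by a vertical inverted index (item -> set of basket ids) built once, counting each candidate subset as the size of the intersection of its items' tid-sets.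
import Mathlib
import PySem

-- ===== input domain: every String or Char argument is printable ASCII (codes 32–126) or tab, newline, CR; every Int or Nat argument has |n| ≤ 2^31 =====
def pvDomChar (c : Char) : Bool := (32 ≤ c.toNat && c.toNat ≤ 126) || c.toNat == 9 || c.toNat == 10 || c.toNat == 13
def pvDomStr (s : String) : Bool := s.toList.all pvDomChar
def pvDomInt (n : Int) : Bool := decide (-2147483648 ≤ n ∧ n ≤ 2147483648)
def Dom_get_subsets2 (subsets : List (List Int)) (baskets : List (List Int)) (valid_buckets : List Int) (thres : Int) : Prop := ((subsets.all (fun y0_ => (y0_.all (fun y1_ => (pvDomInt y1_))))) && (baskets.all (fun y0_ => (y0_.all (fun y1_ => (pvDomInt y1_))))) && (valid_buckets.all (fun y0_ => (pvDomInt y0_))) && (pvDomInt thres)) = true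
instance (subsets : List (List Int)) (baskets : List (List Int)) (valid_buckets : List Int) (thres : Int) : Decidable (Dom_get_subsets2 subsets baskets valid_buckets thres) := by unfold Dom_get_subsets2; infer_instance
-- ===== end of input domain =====

-- B replaces A's per-subset scan over all baskets by a vertical inverted index
-- (item -> set of basket ids) built once, intersecting the items' tid-sets per subset.

def pvHash (n : Int) : Int := if n = -1 then -2 else n
def pvBuildIndex (baskets : List (List Int)) : PySem.Dict Int (PySem.Set Int) :=
  (PySem.List.enumerate baskets 0).foldl (fun d p =>
    p.2.foldl (fun d item => d.modify item [] (fun s => PySem.Set.add s p.1)) d) PySem.Dict.empty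


-- ===== PORT A =====
def get_subsets2 (subsets : List (List Int)) (baskets : List (List Int)) (valid_buckets : List Int) (thres : Int) : List (List Int) :=
  let new_baskets : List (PySem.Set Int) :=
    baskets.foldl (fun acc bas => acc ++ [PySem.Set.ofList bas]) []
  subsets.foldl (fun valid subset =>
    match PySem.List.pyGet? (PySem.List.sorted subset (fun x => x) false) 0 with
    | none => valid   -- IndexError on an empty subset: excluded by Pre_
    | some m =>
      if valid_buckets.contains (PySem.Int.mod (pvHash m) 20) then
        let count : Int := new_baskets.foldl (fun c bas =>
          if PySem.Set.issubset (PySem.Set.ofList subset) bas then c + 1 else c) 0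
        if count ≥ thres then valid ++ [subset] else valid
      else valid) []

-- ===== PORT B =====
def get_subsets2_alt (subsets : List (List Int)) (baskets : List (List Int)) (valid_buckets : List Int) (thres : Int) : List (List Int) :=
  let index := pvBuildIndex baskets
  let vb : PySem.Set Int := PySem.Set.ofList valid_buckets
  subsets.foldl (fun valid subset =>
    match PySem.List.min? subset (fun x => x) with
    | none => valid   -- ValueError on an empty subset: excluded by Pre_
    | some m =>
      if PySem.Set.contains vb (PySem.Int.mod (pvHash m) 20) then
        let tids : Option (PySem.Set Int) := subset.foldl (fun acc item =>
          let t := index.getD item []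
          match acc with
          | none => some t
          | some s => some (PySem.Set.inter s t)) none
        if PySem.Set.len (tids.getD []) ≥ thres then valid ++ [subset] else valid
      else valid) []

-- ===== PRECONDITION & SPEC =====
-- Pre_ excludes an empty candidate subset: there A raises IndexError (sorted(subset)[0]) and B raises ValueError (min(subset)).
def Pre_get_subsets2 (subsets : List (List Int)) (baskets : List (List Int)) (valid_buckets : List Int) (thres : Int) : Prop :=
  ∀ s ∈ subsets, s ≠ []
instance (subsets : List (List Int)) (baskets : List (List Int)) (valid_buckets : List Int) (thres : Int) : Decidable (Pre_get_subsets2 subsets baskets valid_buckets thres) := by unfold Pre_get_subsets2; infer_instance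

def pvWitness_get_subsets2 : List (List Int) × List (List Int) × List Int × Int :=
  ([[1, 2], [3]], [[1, 2, 3], [2, 1], [3]], [1, 3], 2)

def Spec_get_subsets2 (subsets : List (List Int)) (baskets : List (List Int)) (valid_buckets : List Int) (thres : Int) (out : List (List Int)) : Prop := out = get_subsets2_alt subsets baskets valid_buckets thres
instance (subsets : List (List Int)) (baskets : List (List Int)) (valid_buckets : List Int) (thres : Int) (out : List (List Int)) : Decidable (Spec_get_subsets2 subsets baskets valid_buckets thres out) := by unfold Spec_get_subsets2; infer_instance

-- ===== CLAIM (what is proved, stated in full; the proofs are below) =====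
def Claim_equal_get_subsets2 : Prop := ∀ (subsets : List (List Int)) (baskets : List (List Int)) (valid_buckets : List Int) (thres : Int), Dom_get_subsets2 subsets baskets valid_buckets thres → Pre_get_subsets2 subsets baskets valid_buckets thres → Spec_get_subsets2 subsets baskets valid_buckets thres (get_subsets2 subsets baskets valid_buckets thres)

-- ===== LEMMAS AND PROOFS =====

def pvTids (baskets : List (List Int)) (item : Int) : List Int :=
  (PySem.List.pyRange 0 baskets.length 1).filter (fun i => decide (item ∈ baskets.getD i.toNat []))

theorem pv_getD_innerFold (b : List Int) (d : PySem.Dict Int (PySem.Set Int)) (i : Int) (item : Int) :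
    (b.foldl (fun d it => d.modify it [] (fun s => PySem.Set.add s i)) d).getD item []
      = if item ∈ b then PySem.Set.add (d.getD item []) i else d.getD item [] := by
  induction b generalizing d with
  | nil => simp
  | cons x rest ih =>
    simp only [List.foldl_cons, ih, PySem.Dict.getD_modify, List.mem_cons]
    by_cases hx : item = x <;> by_cases hr : item ∈ rest <;>
      simp [hx, hr]

theorem pv_tids_mem {baskets : List (List Int)} {item : Int} {j : Int} :
    j ∈ pvTids baskets item ↔ 0 ≤ j ∧ j < baskets.length ∧ item ∈ baskets.getD j.toNat [] := by
  unfold pvTids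
  rw [List.mem_filter, PySem.List.mem_pyRange_one]
  simp [and_assoc]

theorem pv_getD_buildIndex (baskets : List (List Int)) (item : Int) :
    (pvBuildIndex baskets).getD item [] = pvTids baskets item := by
  induction baskets using List.reverseRecOn with
  | nil => simp [pvBuildIndex, pvTids, PySem.List.enumerate]
  | append_singleton bs b ih =>
    have henum : PySem.List.enumerate (bs ++ [b]) 0
        = PySem.List.enumerate bs 0 ++ [((bs.length : Int), b)] := by
      simp [PySem.List.enumerate_append]
    unfold pvBuildIndex at *
    rw [henum, List.foldl_append]
    simp only [List.foldl_cons, List.foldl_nil]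
    rw [pv_getD_innerFold, ih]
    have hnot : ((bs.length : Int)) ∉ pvTids bs item := by
      rw [pv_tids_mem]; rintro ⟨-, hk, -⟩; omega
    have htids : pvTids (bs ++ [b]) item
        = pvTids bs item ++ (if item ∈ b then [(bs.length : Int)] else []) := by
      unfold pvTids
      have hlen : ((bs ++ [b]).length : Int) = (bs.length : Int) + 1 := by
        simp
      rw [hlen, PySem.List.pyRange_one_succ_right (by positivity), List.filter_append]
      congr 1
      · apply List.filter_congr
        intro i hi
        rw [PySem.List.mem_pyRange_one] at hi
        have : (bs ++ [b]).getD i.toNat [] = bs.getD i.toNat [] := by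
          have hlt : i.toNat < bs.length := by omega
          simp [List.getD, List.getElem?_append_left hlt]
        rw [this]
      · have : (bs ++ [b]).getD ((bs.length : Int)).toNat [] = b := by
          simp [List.getD]
        by_cases hb : item ∈ b <;> simp [hb]
    rw [htids]
    by_cases hb : item ∈ b
    · simp [hb, PySem.Set.add_of_not_mem hnot]
    · simp [hb]

theorem pv_foldl_inter (l : List Int) (s : PySem.Set Int) (T : Int → PySem.Set Int) :
    l.foldl (fun s it => PySem.Set.inter s (T it)) s
      = s.filter (fun i => decide (∀ it ∈ l, i ∈ T it)) := by
  induction l generalizing s with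
  | nil => simp
  | cons x rest ih =>
    rw [List.foldl_cons, ih, PySem.Set.inter, List.filter_filter]
    apply List.filter_congr
    intro i _
    rw [Bool.eq_iff_iff]
    simp [and_comm]

theorem pv_foldl_opt (l : List Int) (s : PySem.Set Int) (T : Int → PySem.Set Int) :
    l.foldl (fun (acc : Option (PySem.Set Int)) item =>
        match acc with
        | none => some (T item)
        | some s => some (PySem.Set.inter s (T item))) (some s)
      = some (l.foldl (fun s it => PySem.Set.inter s (T it)) s) := by
  induction l generalizing s with
  | nil => rfl
  | cons x rest ih => rw [List.foldl_cons, List.foldl_cons]; exact ih _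

theorem pv_map_getD_range {α : Type} (bs : List α) (d : α) :
    (List.range bs.length).map (fun i => bs.getD i d) = bs := by
  induction bs with
  | nil => simp
  | cons a t ih =>
    rw [List.length_cons, List.range_succ_eq_map, List.map_cons, List.map_map]
    simp only [List.getD_cons_zero, Function.comp_def, List.getD_cons_succ]
    rw [ih]

theorem pv_countP_range_getD {α : Type} (bs : List α) (d : α) (p : α → Bool) :
    (List.range bs.length).countP (fun i => p (bs.getD i d)) = bs.countP p := by
  conv_rhs => rw [← pv_map_getD_range bs d]
  rw [List.countP_map]
  rfl

theorem pv_length_filter_pyRange (n : Nat) (q : Int → Bool) :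
    ((PySem.List.pyRange 0 n 1).filter q).length
      = (List.range n).countP (fun (k : Nat) => q (k : Int)) := by
  rw [PySem.List.pyRange_one, List.filter_map, List.length_map, ← List.countP_eq_length_filter]
  simp only [sub_zero, Int.toNat_natCast]
  apply List.countP_congr
  intro k _
  simp

theorem pv_sorted_head_eq_min (subset : List Int) :
    PySem.List.pyGet? (PySem.List.sorted subset (fun x => x) false) 0
      = PySem.List.min? subset (fun x => x) := by
  rcases hs : PySem.List.sorted subset (fun x => x) false with _ | ⟨m, t⟩
  · rw [PySem.List.sorted_eq_nil_iff] at hs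
    subst hs; rfl
  · have hne : subset ≠ [] := by
      rintro rfl
      rw [show PySem.List.sorted ([] : List Int) (fun x => x) false = [] from rfl] at hs
      cases hs
    rcases hm : PySem.List.min? subset (fun x => x) with _ | m'
    · rw [PySem.List.min?_eq_none_iff] at hm; exact absurd hm hne
    · have h1 : ∀ y ∈ subset, m ≤ y := PySem.List.key_head_sorted_le subset (fun x => x) hs
      have h2 : ∀ y ∈ subset, m' ≤ y := PySem.List.min?_isMin hm
      have hmmem : m ∈ subset := by
        have : m ∈ PySem.List.sorted subset (fun x => x) false := by
          rw [hs]; exact List.mem_cons_self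
        rwa [PySem.List.mem_sorted] at this
      have hm'mem : m' ∈ subset := PySem.List.min?_mem hm
      have : m = m' := le_antisymm (h1 m' hm'mem) (h2 m hmmem)
      subst this
      norm_num [PySem.List.pyGet?, PySem.List.pyIdx?]

theorem pv_count_eq (baskets : List (List Int)) (subset : List Int) (hne : subset ≠ []) :
    ((baskets.foldl (fun acc bas => acc ++ [PySem.Set.ofList bas]) []).foldl (fun c bas =>
        if PySem.Set.issubset (PySem.Set.ofList subset) bas then c + 1 else c) (0 : Int))
      = PySem.Set.len ((subset.foldl (fun acc item =>
          let t := (pvBuildIndex baskets).getD item []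
          match acc with
          | none => some t
          | some s => some (PySem.Set.inter s t)) none).getD []) := by
  rcases subset with _ | ⟨x, rest⟩
  · exact absurd rfl hne
  conv_rhs => rw [List.foldl_cons]
  simp only [pv_getD_buildIndex]
  rw [pv_foldl_opt rest (pvTids baskets x) (fun it => pvTids baskets it),
    pv_foldl_inter, Option.getD_some, PySem.Set.len]
  have h1 : (pvTids baskets x).filter (fun i => decide (∀ it ∈ rest, i ∈ pvTids baskets it))
      = (PySem.List.pyRange 0 (baskets.length : Int) 1).filter
          (fun i => decide (∀ it ∈ x :: rest, it ∈ baskets.getD i.toNat [])) := by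
    rw [show pvTids baskets x
        = (PySem.List.pyRange 0 (baskets.length : Int) 1).filter
            (fun i => decide (x ∈ baskets.getD i.toNat [])) from rfl,
      List.filter_filter]
    apply List.filter_congr
    intro i hi
    rw [PySem.List.mem_pyRange_one] at hi
    rw [Bool.eq_iff_iff]
    simp only [Bool.and_eq_true, decide_eq_true_eq, List.forall_mem_cons]
    constructor
    · rintro ⟨hrest, hx⟩
      exact ⟨hx, fun it hit => ((pv_tids_mem).mp (hrest it hit)).2.2⟩
    · rintro ⟨hx, hrest⟩
      exact ⟨fun it hit => pv_tids_mem.mpr ⟨hi.1, hi.2, hrest it hit⟩, hx⟩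
  rw [h1]
  rw [PySem.List.foldl_append_singleton_eq_map, List.nil_append,
    PySem.List.foldl_if_add_one, zero_add,
    pv_length_filter_pyRange baskets.length
      (fun i => decide (∀ it ∈ x :: rest, it ∈ baskets.getD i.toNat []))]
  congr 1
  calc List.countP (fun bas => PySem.Set.issubset (PySem.Set.ofList (x :: rest)) bas)
        (baskets.map PySem.Set.ofList)
      = baskets.countP (fun bas => decide (∀ it ∈ x :: rest, it ∈ bas)) := by
        rw [List.countP_map]
        apply List.countP_congr; intro bas _
        rw [Function.comp_apply, Bool.eq_iff_iff, PySem.Set.issubset_iff]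
        simp [PySem.Set.mem_ofList]
    _ = (List.range baskets.length).countP
          (fun (k : Nat) => (fun bas => decide (∀ it ∈ x :: rest, it ∈ bas)) (baskets.getD k [])) :=
        (pv_countP_range_getD baskets [] _).symm
    _ = (List.range baskets.length).countP
          (fun (k : Nat) => decide (∀ it ∈ x :: rest, it ∈ baskets.getD ((k : Int)).toNat [])) := by
        apply List.countP_congr; intro k _; simp

-- per-subset: the two loop bodies agree on a nonempty subset
theorem pv_step_eq (baskets : List (List Int)) (valid_buckets : List Int)
    (thres : Int) (subset : List Int) (valid : List (List Int)) (hne : subset ≠ []) :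
    (match PySem.List.pyGet? (PySem.List.sorted subset (fun x => x) false) 0 with
    | none => valid
    | some m =>
      if valid_buckets.contains (PySem.Int.mod (pvHash m) 20) then
        let count : Int := ((baskets.foldl (fun acc bas => acc ++ [PySem.Set.ofList bas]) []).foldl (fun c bas =>
          if PySem.Set.issubset (PySem.Set.ofList subset) bas then c + 1 else c) 0)
        if count ≥ thres then valid ++ [subset] else valid
      else valid)
    = (match PySem.List.min? subset (fun x => x) with
    | none => valid
    | some m =>
      if PySem.Set.contains (PySem.Set.ofList valid_buckets) (PySem.Int.mod (pvHash m) 20) then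
        let tids : Option (PySem.Set Int) := subset.foldl (fun acc item =>
          let t := (pvBuildIndex baskets).getD item []
          match acc with
          | none => some t
          | some s => some (PySem.Set.inter s t)) none
        if PySem.Set.len (tids.getD []) ≥ thres then valid ++ [subset] else valid
      else valid) := by
  rw [pv_sorted_head_eq_min]
  rcases hm : PySem.List.min? subset (fun x => x) with _ | m
  · rfl
  · simp only []
    have hcontains : valid_buckets.contains (PySem.Int.mod (pvHash m) 20)
        = PySem.Set.contains (PySem.Set.ofList valid_buckets) (PySem.Int.mod (pvHash m) 20) := by
      rw [Bool.eq_iff_iff, List.contains_iff_mem, PySem.Set.contains_iff, PySem.Set.mem_ofList]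
    rw [hcontains, pv_count_eq baskets subset hne]

-- ===== VERDICT (by name: the statement is the Claim_ definition above) =====
theorem get_subsets2_spec : Claim_equal_get_subsets2 := by
  intro subsets baskets valid_buckets thres hdom hpre
  clear hdom
  unfold Spec_get_subsets2 get_subsets2 get_subsets2_alt
  simp only []
  induction subsets using List.reverseRecOn with
  | nil => rfl
  | append_singleton init s ih =>
    have hpre2 : ∀ t ∈ init, t ≠ [] := fun t ht => hpre t (List.mem_append_left _ ht)
    have hs : s ≠ [] := hpre s (List.mem_append_right _ List.mem_cons_self)
    rw [List.foldl_append, List.foldl_append, ← ih hpre2]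
    simp only [List.foldl_cons, List.foldl_nil]
    exact pv_step_eq baskets valid_buckets thres s _ hs
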